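-- pv_equiv track=rewrite | github.com/iZhang/Python | CS101_Eclipse/apt_uniquezoo/src/UniqueZoo.py | numberUnique
-- ===== SOURCE A (Python) =====
-- def numberUnique(zoos):
--     animals = []
--
--     for element in zoos:
--         animals += element.split()
--
--     uniquezoos = 0
--     uniqueanimals = 0
--     for element in zoos:
--         for i in range(0,len(element.split())):
--             if animals.count(element.split()[i]) == 1:
--                 uniqueanimals += 1
--         if uniqueanimals >= 1:
--             uniquezoos += 1
--         uniqueanimals = 0
--
--     return uniquezoos
-- ===== SOURCE B (Python) =====
-- def numberUnique(zoos):
--     freq = {}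
--     where = {}
--     for idx, zoo in enumerate(zoos):
--         for tok in zoo.split():
--             freq[tok] = freq.get(tok, 0) + 1
--             where[tok] = idx
--     seen = set()
--     for tok, c in freq.items():
--         if c == 1:
--             seen.add(where[tok])
--     return len(seen)
-- ===== Notes on version B (the rewrite author's own statement) =====
-- stated objective: faster
-- what changed: Instead of flattening all animals and rescanning that list with animals.count for every token of every zoo, B does one pass building a token-frequency dict and a token-to-zoo-index dict, then iterates the frequency table, collects the zoo indices of count-1 tokens into a set, and returns its size.
import Mathlib
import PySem

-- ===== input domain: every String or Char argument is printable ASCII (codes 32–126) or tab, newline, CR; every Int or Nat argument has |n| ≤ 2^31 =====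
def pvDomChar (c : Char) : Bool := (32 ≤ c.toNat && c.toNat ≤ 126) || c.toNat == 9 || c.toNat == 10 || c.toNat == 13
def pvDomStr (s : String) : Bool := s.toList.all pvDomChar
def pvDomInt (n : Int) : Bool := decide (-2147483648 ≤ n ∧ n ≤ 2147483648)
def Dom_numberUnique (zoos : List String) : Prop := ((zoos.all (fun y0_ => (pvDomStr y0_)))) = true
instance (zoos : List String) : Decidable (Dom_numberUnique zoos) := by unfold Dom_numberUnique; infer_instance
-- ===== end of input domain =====

-- B replaces A's quadratic rescans of the flattened animal list by one pass building a
-- token-frequency dict plus a token→zoo-index dict, then collects the zoo indices of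
-- count-1 tokens into a set and returns its size (objective: faster).

-- ===== PORT A =====
-- literal port of Source A: animals is the concatenation of all splits; then for each zoo,
-- count tokens whose global count is 1, bump uniquezoos if that count is ≥ 1, reset it.
-- element.split()[i] always has 0 ≤ i < len, so pyGetD is exact here (no IndexError).
def numberUnique (zoos : List String) : Int :=
  let animals := zoos.foldl (fun acc element => acc ++ PySem.Str.split₀ element) []
  let st := zoos.foldl
    (fun (st : Int × Int) element =>
      let uniqueanimals := (PySem.List.pyRange 0 (PySem.List.len (PySem.Str.split₀ element))).foldl
        (fun (uniqueanimals : Int) i =>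
          if PySem.List.count animals (PySem.List.pyGetD (PySem.Str.split₀ element) i "") = 1
          then uniqueanimals + 1 else uniqueanimals)
        st.2
      if uniqueanimals ≥ 1 then (st.1 + 1, (0 : Int)) else (st.1, (0 : Int)))
    ((0 : Int), (0 : Int))
  st.1

-- ===== PORT B =====
-- literal port of Source B: one pass over enumerate(zoos) building freq and where; then one
-- pass over freq.items adding where[tok] (key always present, so getD is exact) to a set.
def numberUnique_alt (zoos : List String) : Int :=
  let fw := (PySem.List.enumerate zoos 0).foldl
    (fun (st : PySem.Dict String Int × PySem.Dict String Int) p =>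
      (PySem.Str.split₀ p.2).foldl
        (fun st2 tok => (st2.1.insert tok (st2.1.getD tok 0 + 1), st2.2.insert tok p.1))
        st)
    (PySem.Dict.empty, PySem.Dict.empty)
  let seen := fw.1.items.foldl
    (fun (s : PySem.Set Int) kv => if kv.2 = 1 then s.add (fw.2.getD kv.1 0) else s)
    PySem.Set.empty
  PySem.Set.len seen

-- ===== PRECONDITION & SPEC =====
def Spec_numberUnique (zoos : List String) (out : Int) : Prop := out = numberUnique_alt zoos
instance (zoos : List String) (out : Int) : Decidable (Spec_numberUnique zoos out) := by unfold Spec_numberUnique; infer_instance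

-- ===== CLAIM (what is proved, stated in full; the proofs are below) =====
def Claim_equal_numberUnique : Prop := ∀ (zoos : List String), Dom_numberUnique zoos → Spec_numberUnique zoos (numberUnique zoos)

-- ===== LEMMAS AND PROOFS =====

-- tokens of one zoo, all tokens, and A's per-zoo predicate "has a globally unique animal"
def pvToks (e : String) : List String := PySem.Str.split₀ e
def pvFlat (zoos : List String) : List String := zoos.flatMap pvToks
def pvQ (fl : List String) (e : String) : Bool := (pvToks e).any (fun t => PySem.List.count fl t == 1)

-- A's per-zoo step (zeta-reduced form of the lambda in the port)
def pvStepA (fl : List String) : Int × Int → String → Int × Int :=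
  fun st element =>
    if (PySem.List.pyRange 0 (PySem.List.len (PySem.Str.split₀ element))).foldl
        (fun (uniqueanimals : Int) i =>
          if PySem.List.count fl (PySem.List.pyGetD (PySem.Str.split₀ element) i "") = 1
          then uniqueanimals + 1 else uniqueanimals)
        st.2 ≥ 1
    then (st.1 + 1, (0 : Int)) else (st.1, (0 : Int))

-- B's where-dict and seen-set folds as standalone functions
def pvWhereF (zs : List (Int × String)) (d : PySem.Dict String Int) : PySem.Dict String Int :=
  zs.foldl (fun d p => (pvToks p.2).foldl (fun d t => d.insert t p.1) d) d

def pvSeenF (items : List (String × Int)) (w : PySem.Dict String Int) (s : PySem.Set Int) : PySem.Set Int :=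
  items.foldl (fun s kv => if kv.2 = 1 then s.add (w.getD kv.1 0) else s) s

lemma pv_inner (fl : List String) (e : String) (a : Int) :
    (PySem.List.pyRange 0 (PySem.List.len (PySem.Str.split₀ e))).foldl
      (fun (ua : Int) i =>
        if PySem.List.count fl (PySem.List.pyGetD (PySem.Str.split₀ e) i "") = 1
        then ua + 1 else ua) a
    = a + (List.countP (fun t => PySem.List.count fl t == 1) (PySem.Str.split₀ e) : Int) := by
  have h1 : (PySem.List.pyRange 0 (PySem.List.len (PySem.Str.split₀ e))).foldl
      (fun (ua : Int) i =>
        if PySem.List.count fl (PySem.List.pyGetD (PySem.Str.split₀ e) i "") = 1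
        then ua + 1 else ua) a
      = ((PySem.List.pyRange 0 (PySem.List.len (PySem.Str.split₀ e))).map
          (fun i => PySem.List.pyGetD (PySem.Str.split₀ e) i "")).foldl
        (fun (ua : Int) t => if PySem.List.count fl t = 1 then ua + 1 else ua) a := by
    rw [List.foldl_map]
  rw [h1, PySem.List.map_pyGetD_pyRange_zero]
  have h2 : (fun (ua : Int) t => if PySem.List.count fl t = 1 then ua + 1 else ua)
      = (fun (ua : Int) t => if (PySem.List.count fl t == 1) = true then ua + 1 else ua) := by
    funext ua t
    by_cases h : PySem.List.count fl t = 1 <;> simp_all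
  rw [h2, PySem.List.foldl_count_if]

lemma pv_stepA (fl : List String) (c : Int) (z : String) :
    pvStepA fl (c, 0) z = if pvQ fl z then (c + 1, (0 : Int)) else (c, (0 : Int)) := by
  simp only [pvStepA]
  rw [pv_inner fl z 0]
  by_cases hq : pvQ fl z
  · have hpos : 0 < List.countP (fun t => PySem.List.count fl t == 1) (PySem.Str.split₀ z) := by
      rw [List.countP_pos_iff]
      obtain ⟨t, ht, hc⟩ := List.any_eq_true.mp hq
      exact ⟨t, ht, hc⟩
    rw [if_pos hq, if_pos (by omega)]
  · have hzero : List.countP (fun t => PySem.List.count fl t == 1) (PySem.Str.split₀ z) = 0 := by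
      rw [List.countP_eq_zero]
      intro t ht hc
      exact hq (List.any_eq_true.mpr ⟨t, ht, hc⟩)
    rw [if_neg hq, if_neg (by rw [hzero]; norm_num)]

lemma pvA_outer (fl : List String) (l : List String) (c : Int) :
    (l.foldl (pvStepA fl) (c, (0 : Int))).1 = c + (List.countP (pvQ fl) l : Int) := by
  induction l generalizing c with
  | nil => simp
  | cons z l ih =>
    rw [List.foldl_cons, pv_stepA]
    by_cases hq : pvQ fl z
    · rw [if_pos hq, ih, List.countP_cons]
      simp only [hq, if_true]
      push_cast
      ring
    · rw [if_neg hq, ih, List.countP_cons]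
      simp [hq]

lemma pv_flat_eq (zoos : List String) :
    zoos.foldl (fun acc element => acc ++ PySem.Str.split₀ element) [] = pvFlat zoos := by
  rw [PySem.List.foldl_append_eq_flatMap]
  rfl

lemma pvA_char (zoos : List String) :
    numberUnique zoos = (List.countP (pvQ (pvFlat zoos)) zoos : Int) := by
  have h : numberUnique zoos = (zoos.foldl (pvStepA (pvFlat zoos)) ((0:Int), (0:Int))).1 := by
    unfold numberUnique
    rw [pv_flat_eq]
    rfl
  rw [h, pvA_outer]
  simp

lemma pv_freq_gen (zoos : List String) (d0 : PySem.Dict String Int) :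
    (pvFlat zoos).foldl (fun d tok => d.insert tok (d.getD tok 0 + 1)) d0
      = zoos.foldl
        (fun (d : PySem.Dict String Int) z =>
          (PySem.Str.split₀ z).foldl (fun d tok => d.insert tok (d.getD tok 0 + 1)) d) d0 := by
  rw [pvFlat, List.flatMap_def, List.foldl_flatten, List.foldl_map]
  rfl

lemma pv_freq_eq (zoos : List String) :
    (PySem.List.enumerate zoos 0).foldl
      (fun (d : PySem.Dict String Int) p =>
        (PySem.Str.split₀ p.2).foldl (fun d tok => d.insert tok (d.getD tok 0 + 1)) d)
      PySem.Dict.empty = PySem.Dict.counter (pvFlat zoos) := by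
  have e1 : (PySem.List.enumerate zoos 0).foldl
      (fun (d : PySem.Dict String Int) p =>
        (PySem.Str.split₀ p.2).foldl (fun d tok => d.insert tok (d.getD tok 0 + 1)) d)
      PySem.Dict.empty
      = ((PySem.List.enumerate zoos 0).map (fun p => p.2)).foldl
        (fun (d : PySem.Dict String Int) z =>
          (PySem.Str.split₀ z).foldl (fun d tok => d.insert tok (d.getD tok 0 + 1)) d)
        PySem.Dict.empty := by rw [List.foldl_map]
  rw [e1, PySem.List.map_snd_enumerate, ← pv_freq_gen,
    PySem.Dict.foldl_insert_getD_add_one_eq_counter]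

lemma pvB_char (zoos : List String) :
    numberUnique_alt zoos =
      PySem.Set.len (pvSeenF (PySem.Dict.counter (pvFlat zoos)).items
        (pvWhereF (PySem.List.enumerate zoos 0) PySem.Dict.empty) PySem.Set.empty) := by
  have hstep : (fun (st : PySem.Dict String Int × PySem.Dict String Int) (p : Int × String) =>
      (PySem.Str.split₀ p.2).foldl
        (fun st2 tok => (st2.1.insert tok (st2.1.getD tok 0 + 1), st2.2.insert tok p.1))
        st)
      = (fun st p =>
        ((PySem.Str.split₀ p.2).foldl (fun d tok => d.insert tok (d.getD tok 0 + 1)) st.1,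
         (PySem.Str.split₀ p.2).foldl (fun d tok => d.insert tok p.1) st.2)) := by
    funext st p
    cases st with
    | mk a b =>
      exact PySem.List.foldl_prod_mk (fun d tok => d.insert tok (d.getD tok 0 + 1))
        (fun d tok => d.insert tok p.1) (PySem.Str.split₀ p.2) a b
  have hfw : (PySem.List.enumerate zoos 0).foldl
      (fun (st : PySem.Dict String Int × PySem.Dict String Int) p =>
        (PySem.Str.split₀ p.2).foldl
          (fun st2 tok => (st2.1.insert tok (st2.1.getD tok 0 + 1), st2.2.insert tok p.1))
          st)
      (PySem.Dict.empty, PySem.Dict.empty)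
      = (PySem.Dict.counter (pvFlat zoos), pvWhereF (PySem.List.enumerate zoos 0) PySem.Dict.empty) := by
    rw [hstep, PySem.List.foldl_prod_mk
      (fun (d : PySem.Dict String Int) (p : Int × String) =>
        (PySem.Str.split₀ p.2).foldl (fun d tok => d.insert tok (d.getD tok 0 + 1)) d)
      (fun (d : PySem.Dict String Int) (p : Int × String) =>
        (PySem.Str.split₀ p.2).foldl (fun d tok => d.insert tok p.1) d),
      pv_freq_eq]
    rfl
  unfold numberUnique_alt
  rw [hfw]
  rfl

lemma pv_get?_insertconst (l : List String) (d : PySem.Dict String Int) (i : Int) (x : String) :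
    (l.foldl (fun d t => d.insert t i) d).get? x = if x ∈ l then some i else d.get? x := by
  induction l generalizing d with
  | nil => simp
  | cons a l ih =>
    simp only [List.foldl_cons, ih, List.mem_cons, PySem.Dict.get?_insert]
    by_cases hx : x ∈ l <;> by_cases hxa : x = a <;> simp_all

lemma pv_where_not (zs : List String) (s : Int) (d : PySem.Dict String Int) (t : String)
    (h : t ∉ zs.flatMap pvToks) :
    (pvWhereF (PySem.List.enumerate zs s) d).get? t = d.get? t := by
  induction zs generalizing s d with
  | nil => rfl
  | cons z zs ih =>
    rw [List.flatMap_cons] at h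
    rw [PySem.List.enumerate_cons]
    show (pvWhereF (PySem.List.enumerate zs (s+1)) ((pvToks z).foldl (fun d t => d.insert t s) d)).get? t = _
    rw [ih _ _ (fun hm => h (List.mem_append.mpr (Or.inr hm))), pv_get?_insertconst,
      if_neg (fun hm => h (List.mem_append.mpr (Or.inl hm)))]

lemma pv_where_unique (zs : List String) (s : Int) (d : PySem.Dict String Int) (t : String)
    (k : Nat) (hk : k < zs.length) (hmem : t ∈ pvToks zs[k])
    (huniq : ∀ j (hj : j < zs.length), j ≠ k → t ∉ pvToks zs[j]) :
    (pvWhereF (PySem.List.enumerate zs s) d).get? t = some (s + k) := by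
  induction zs generalizing s d k with
  | nil => exact absurd hk (by simp)
  | cons z zs ih =>
    rw [PySem.List.enumerate_cons]
    show (pvWhereF (PySem.List.enumerate zs (s+1)) ((pvToks z).foldl (fun d t => d.insert t s) d)).get? t = _
    cases k with
    | zero =>
      have hnot : t ∉ zs.flatMap pvToks := by
        intro hm
        obtain ⟨e, he, hte⟩ := List.mem_flatMap.mp hm
        obtain ⟨j, hj, rfl⟩ := List.mem_iff_getElem.mp he
        exact huniq (j+1) (by simpa using hj) (by omega) (by simpa using hte)
      rw [pv_where_not _ _ _ _ hnot, pv_get?_insertconst, if_pos (by simpa using hmem)]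
      simp
    | succ k =>
      have hk' : k < zs.length := by simp at hk; omega
      have hmem' : t ∈ pvToks zs[k] := by simpa using hmem
      have huniq' : ∀ j (hj : j < zs.length), j ≠ k → t ∉ pvToks zs[j] := by
        intro j hj hjk
        have := huniq (j+1) (by simp; omega) (by omega)
        simpa using this
      rw [ih (s+1) ((pvToks z).foldl (fun d t => d.insert t s) d) k hk' hmem' huniq']
      congr 1
      push_cast
      ring

lemma pv_unique_index (zs : List String) (t : String)
    (h : (zs.flatMap pvToks).count t = 1) :
    ∃ k, ∃ hk : k < zs.length, t ∈ pvToks zs[k] ∧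
      ∀ j (hj : j < zs.length), j ≠ k → t ∉ pvToks zs[j] := by
  induction zs with
  | nil => simp at h
  | cons z zs ih =>
    rw [List.flatMap_cons, List.count_append] at h
    by_cases hz : t ∈ pvToks z
    · have h1 : 1 ≤ (pvToks z).count t := List.one_le_count_iff.mpr hz
      have h0 : (zs.flatMap pvToks).count t = 0 := by omega
      have hnot : t ∉ zs.flatMap pvToks := List.count_eq_zero.mp h0
      refine ⟨0, by simp, by simpa using hz, ?_⟩
      intro j hj hj0
      cases j with
      | zero => exact absurd rfl hj0
      | succ j =>
        intro hm
        have hj' : j < zs.length := by simp at hj; omega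
        exact hnot (List.mem_flatMap.mpr ⟨zs[j], List.getElem_mem _, by simpa using hm⟩)
    · have h0 : (pvToks z).count t = 0 := List.count_eq_zero.mpr hz
      obtain ⟨k, hk, hmem, huniq⟩ := ih (by omega)
      refine ⟨k+1, by simpa using hk, by simpa using hmem, ?_⟩
      intro j hj hjk
      cases j with
      | zero => simpa using hz
      | succ j => simpa using huniq j (by simpa using hj) (by omega)

lemma pv_mem_seen (items : List (String × Int)) (w : PySem.Dict String Int)
    (s : PySem.Set Int) (i : Int) :
    i ∈ pvSeenF items w s ↔ i ∈ s ∨ ∃ kv ∈ items, kv.2 = 1 ∧ i = w.getD kv.1 0 := by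
  unfold pvSeenF
  induction items generalizing s with
  | nil => simp
  | cons kv items ih =>
    rw [List.foldl_cons]
    by_cases h1 : kv.2 = 1
    · rw [if_pos h1, ih, PySem.Set.mem_add]
      constructor
      · rintro ((h | hnew) | ⟨p, hp, h2, hi⟩)
        · exact Or.inl h
        · exact Or.inr ⟨kv, List.mem_cons_self, h1, hnew⟩
        · exact Or.inr ⟨p, List.mem_cons_of_mem _ hp, h2, hi⟩
      · rintro (h | ⟨p, hp, h2, hi⟩)
        · exact Or.inl (Or.inl h)
        · rcases List.mem_cons.mp hp with rfl | hp'
          · exact Or.inl (Or.inr hi)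
          · exact Or.inr ⟨p, hp', h2, hi⟩
    · rw [if_neg h1, ih]
      constructor
      · rintro (h | ⟨p, hp, h2, hi⟩)
        · exact Or.inl h
        · exact Or.inr ⟨p, List.mem_cons_of_mem _ hp, h2, hi⟩
      · rintro (h | ⟨p, hp, h2, hi⟩)
        · exact Or.inl h
        · rcases List.mem_cons.mp hp with rfl | hp'
          · exact absurd h2 h1
          · exact Or.inr ⟨p, hp', h2, hi⟩

lemma pv_nodup_seen (items : List (String × Int)) (w : PySem.Dict String Int)
    (s : PySem.Set Int) (h : (s : List Int).Nodup) : (pvSeenF items w s : List Int).Nodup := by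
  unfold pvSeenF
  induction items generalizing s with
  | nil => exact h
  | cons kv items ih =>
    rw [List.foldl_cons]
    by_cases h1 : kv.2 = 1
    · rw [if_pos h1]
      exact ih _ (PySem.Set.nodup_add _ _ h)
    · rw [if_neg h1]
      exact ih _ h

lemma pv_main (zoos : List String) : numberUnique zoos = numberUnique_alt zoos := by
  rw [pvA_char, pvB_char]
  have hmem : ∀ i : Int,
      i ∈ pvSeenF (PySem.Dict.counter (pvFlat zoos)).items
            (pvWhereF (PySem.List.enumerate zoos 0) PySem.Dict.empty) PySem.Set.empty
      ↔ i ∈ ((PySem.List.enumerate zoos 0).filter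
              (fun p => pvQ (pvFlat zoos) p.2)).map (fun p => p.1) := by
    intro i
    rw [pv_mem_seen, PySem.Dict.items_counter]
    constructor
    · rintro (h | ⟨kv, hkv, h1, hi⟩)
      · simp [PySem.Set.empty] at h
      · obtain ⟨t, htof, rfl⟩ := List.mem_map.mp hkv
        have h1' : ((List.count t (pvFlat zoos) : Int)) = 1 := h1
        have hcnt : List.count t (pvFlat zoos) = 1 := by exact_mod_cast h1'

        obtain ⟨k, hk, hmemk, huniq⟩ := pv_unique_index zoos t hcnt
        have hw := pv_where_unique zoos 0 PySem.Dict.empty t k hk hmemk huniq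
        have hgd : (pvWhereF (PySem.List.enumerate zoos 0) PySem.Dict.empty).getD t 0 = (k : Int) := by
          rw [PySem.Dict.getD_eq_get?_getD, hw]
          simp
        refine List.mem_map.mpr ⟨((k : Int), zoos[k]), List.mem_filter.mpr ⟨?_, ?_⟩, ?_⟩
        · exact (PySem.List.mem_enumerate_iff zoos 0 _).mpr ⟨k, hk, by simp⟩
        · show pvQ (pvFlat zoos) zoos[k] = true
          exact List.any_eq_true.mpr ⟨t, hmemk, by
            show (PySem.List.count (pvFlat zoos) t == 1) = true
            have : PySem.List.count (pvFlat zoos) t = List.count t (pvFlat zoos) := rfl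
            rw [this, hcnt]
            rfl⟩
        · show (k : Int) = i
          rw [hi]
          exact hgd.symm
    · intro hJ
      obtain ⟨p, hpf, hpi⟩ := List.mem_map.mp hJ
      obtain ⟨hpe, hq⟩ := List.mem_filter.mp hpf
      obtain ⟨k, hk, rfl⟩ := (PySem.List.mem_enumerate_iff zoos 0 p).mp hpe
      obtain ⟨t, ht, hc⟩ := List.any_eq_true.mp hq
      have ht' : t ∈ pvToks zoos[k] := ht
      have hcnt : List.count t (pvFlat zoos) = 1 := by
        have : PySem.List.count (pvFlat zoos) t = 1 := by simpa using hc
        exact this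
      obtain ⟨k', hk', hmemk', huniq'⟩ := pv_unique_index zoos t hcnt
      have hkk : k = k' := by
        by_contra hne
        exact huniq' k hk hne ht'
      subst hkk
      have hw := pv_where_unique zoos 0 PySem.Dict.empty t k hk' hmemk' huniq'
      have hgd : (pvWhereF (PySem.List.enumerate zoos 0) PySem.Dict.empty).getD t 0 = (k : Int) := by
        rw [PySem.Dict.getD_eq_get?_getD, hw]
        simp
      refine Or.inr ⟨(t, (List.count t (pvFlat zoos) : Int)), ?_, ?_, ?_⟩
      · exact List.mem_map.mpr ⟨t, (PySem.Set.mem_ofList _ _).mpr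
          (List.mem_flatMap.mpr ⟨zoos[k], List.getElem_mem _, ht'⟩), rfl⟩
      · show (List.count t (pvFlat zoos) : Int) = 1
        rw [hcnt]
        rfl
      · show i = _
        rw [hgd, ← hpi]
        simp
  have hnodup₁ := pv_nodup_seen (PySem.Dict.counter (pvFlat zoos)).items
    (pvWhereF (PySem.List.enumerate zoos 0) PySem.Dict.empty) PySem.Set.empty List.nodup_nil
  have hnodup₂ : (((PySem.List.enumerate zoos 0).filter
      (fun p => pvQ (pvFlat zoos) p.2)).map (fun p => p.1)).Nodup := by
    have hp := PySem.List.pairwise_lt_enumerate zoos 0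
    have hp2 := hp.filter (fun p => pvQ (pvFlat zoos) p.2)
    exact List.Pairwise.map (fun p : Int × String => p.1)
      (fun (a b : Int × String) (hab : a.1 < b.1) => ne_of_lt hab) hp2
  have hperm := (List.perm_ext_iff_of_nodup hnodup₁ hnodup₂).mpr hmem
  have hlen := hperm.length_eq
  have hJlen : (((PySem.List.enumerate zoos 0).filter
      (fun p => pvQ (pvFlat zoos) p.2)).map (fun p => p.1)).length
      = List.countP (pvQ (pvFlat zoos)) zoos := by
    rw [List.length_map, ← List.countP_eq_length_filter]
    have h : List.countP (pvQ (pvFlat zoos)) ((PySem.List.enumerate zoos 0).map (fun p => p.2))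
        = List.countP ((pvQ (pvFlat zoos)) ∘ (fun p : Int × String => p.2))
          (PySem.List.enumerate zoos 0) := List.countP_map
    rw [PySem.List.map_snd_enumerate] at h
    exact h.symm
  calc (List.countP (pvQ (pvFlat zoos)) zoos : Int)
      = ((((PySem.List.enumerate zoos 0).filter
          (fun p => pvQ (pvFlat zoos) p.2)).map (fun p => p.1)).length : Int) := by rw [hJlen]
    _ = ((pvSeenF (PySem.Dict.counter (pvFlat zoos)).items
          (pvWhereF (PySem.List.enumerate zoos 0) PySem.Dict.empty) PySem.Set.empty
            : List Int).length : Int) := by rw [hlen]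
    _ = PySem.Set.len (pvSeenF (PySem.Dict.counter (pvFlat zoos)).items
          (pvWhereF (PySem.List.enumerate zoos 0) PySem.Dict.empty) PySem.Set.empty) := rfl

-- ===== VERDICT (by name: the statement is the Claim_ definition above) =====
theorem numberUnique_spec : Claim_equal_numberUnique := by
  intro zoos _
  unfold Spec_numberUnique
  exact pv_main zoos
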